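-- pv_equiv track=rewrite | github.com/shiva-menta/wordle_bot | backend/src/wordle_solver.py | get_all_possible_template_types
-- ===== SOURCE A (Python) =====
-- from itertools import product
-- from typing import List
--
-- def get_all_possible_template_types(template: str) -> List[str]: # returns all template types possible with locked green letters
--     green_indices = set()
--     ret_strings = []
--
--     for i in range(5):
--         if template[i] == 'g':
--             green_indices.add(i)
--
--
--     non_green_len = len(set([0,1,2,3,4]).difference(green_indices))
--
--     green_indices = list(green_indices)
--     green_indices.sort()
--
--     ret = [list(''.join(temp)) for temp in
--         product('xyg', repeat=non_green_len)]
--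
--     for temp in ret:
--         for ind in green_indices:
--             temp.insert(ind, 'g')
--
--     for temp in ret:
--         ret_strings.append(''.join(temp))
--
--     return ret_strings
-- ===== SOURCE B (Python) =====
-- def get_all_possible_template_types(template: str): # returns all template types possible with locked green letters
--     results = []
--
--     def walk(i, prefix):
--         if i == 5:
--             results.append(prefix)
--         elif template[i] == 'g':
--             walk(i + 1, prefix + 'g')
--         else:
--             for c in 'xyg':
--                 walk(i + 1, prefix + c)
--
--     walk(0, '')
--     return results
-- ===== Notes on version B (the rewrite author's own statement) =====
-- stated objective: simpler
-- what changed: Replaces A's set-of-green-indices + itertools.product over the non-green slots + per-string re-insertion of 'g' at each green index by a single recursive walk over positions 0..4 that builds each output string left to right, branching over 'x','y','g' at non-green positions.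
import Mathlib
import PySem

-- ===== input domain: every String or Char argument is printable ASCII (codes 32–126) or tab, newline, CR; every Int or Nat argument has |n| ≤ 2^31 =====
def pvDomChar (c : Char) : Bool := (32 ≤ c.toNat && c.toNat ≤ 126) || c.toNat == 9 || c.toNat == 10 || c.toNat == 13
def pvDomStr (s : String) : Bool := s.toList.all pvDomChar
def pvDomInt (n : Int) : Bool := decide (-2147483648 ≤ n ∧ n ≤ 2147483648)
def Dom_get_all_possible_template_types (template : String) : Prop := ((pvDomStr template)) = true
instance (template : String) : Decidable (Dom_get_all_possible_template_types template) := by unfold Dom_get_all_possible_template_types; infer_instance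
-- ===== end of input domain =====

-- B replaces A's product-then-insert pipeline by a single recursive walk over the five
-- positions that builds each string left to right (objective: simpler).

-- ===== PORT A =====
-- itertools.product('xyg', repeat=n): lists of length n over ['x','y','g'], leftmost slot varying slowest
def pvProdXYG : Nat → List (List Char)
  | 0 => [[]]
  | n + 1 => (['x', 'y', 'g']).flatMap (fun c => (pvProdXYG n).map (fun t => c :: t))

def get_all_possible_template_types (template : String) : List String :=
  -- for i in range(5): if template[i] == 'g': green_indices.add(i)
  -- (template[i] raises IndexError when len < 5; Pre_ excludes that, so .getD ' ' never fires)
  let green_indices : PySem.Set Int :=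
    (PySem.List.pyRange 0 5 1).foldl
      (fun s i => if (PySem.Str.pyGet? template i).getD ' ' = 'g' then PySem.Set.add s i else s)
      PySem.Set.empty
  let non_green_len : Nat := (PySem.Set.diff (PySem.Set.ofList [0, 1, 2, 3, 4]) green_indices).length
  -- green_indices = list(green_indices); green_indices.sort()  (no key: order-independent of set order)
  let green_sorted : List Int := PySem.List.sorted green_indices (fun x => x) false
  -- ret = [list(''.join(temp)) for temp in product('xyg', repeat=non_green_len)]  (join∘list = identity on char tuples)
  let ret : List (List Char) := pvProdXYG non_green_len
  -- for temp in ret: for ind in green_indices: temp.insert(ind, 'g')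
  let ret' : List (List Char) :=
    ret.map (fun temp => green_sorted.foldl (fun t ind => PySem.List.insert t ind 'g') temp)
  -- for temp in ret: ret_strings.append(''.join(temp))
  ret'.foldl (fun acc temp => acc ++ [String.ofList temp]) []

-- ===== PORT B =====
-- walk(i, prefix): fuel = 5 - i, so fuel = 0 exactly when i == 5
def pvWalk (template : String) (i : Nat) (prefix' : List Char) : Nat → List String
  | 0 => [String.ofList prefix']
  | fuel + 1 =>
    -- template[i] raises IndexError when i out of range; Pre_ excludes that, so .getD ' ' never fires
    if (PySem.Str.pyGet? template (i : Int)).getD ' ' = 'g' then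
      pvWalk template (i + 1) (prefix' ++ ['g']) fuel
    else
      (['x', 'y', 'g']).flatMap (fun c => pvWalk template (i + 1) (prefix' ++ [c]) fuel)

def get_all_possible_template_types_alt (template : String) : List String :=
  pvWalk template 0 [] 5

-- ===== PRECONDITION & SPEC =====
-- Python A indexes template[0..4] and raises IndexError on strings shorter than 5 characters.
def Pre_get_all_possible_template_types (template : String) : Prop := 5 ≤ template.toList.length
instance (template : String) : Decidable (Pre_get_all_possible_template_types template) := by unfold Pre_get_all_possible_template_types; infer_instance

def pvWitness_get_all_possible_template_types : String := "gxgyz"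

def Spec_get_all_possible_template_types (template : String) (out : List String) : Prop := out = get_all_possible_template_types_alt template
instance (template : String) (out : List String) : Decidable (Spec_get_all_possible_template_types template out) := by unfold Spec_get_all_possible_template_types; infer_instance

-- ===== CLAIM (what is proved, stated in full; the proofs are below) =====
def Claim_equal_get_all_possible_template_types : Prop := ∀ (template : String), Dom_get_all_possible_template_types template → Pre_get_all_possible_template_types template → Spec_get_all_possible_template_types template (get_all_possible_template_types template)

-- ===== LEMMAS AND PROOFS =====

-- ===== VERDICT (by name: the statement is the Claim_ definition above) =====
set_option maxHeartbeats 2000000 in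
set_option maxRecDepth 4096 in
theorem get_all_possible_template_types_spec : Claim_equal_get_all_possible_template_types := by
  intro template _ hpre
  unfold Spec_get_all_possible_template_types
  obtain ⟨c0, c1, c2, c3, c4, rest, h5⟩ :
      ∃ c0 c1 c2 c3 c4 rest, template.toList = c0 :: c1 :: c2 :: c3 :: c4 :: rest := by
    unfold Pre_get_all_possible_template_types at hpre
    rcases h : template.toList with _ | ⟨a, _ | ⟨b, _ | ⟨c, _ | ⟨d, _ | ⟨e, r⟩⟩⟩⟩⟩ <;>
      rw [h] at hpre <;> simp at hpre <;> exact ⟨a, b, c, d, e, r, rfl⟩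
  have e0 : PySem.Str.pyGet? template (0 : Int) = some c0 := by
    rw [show ((0 : Int)) = ((0 : Nat) : Int) by norm_num, PySem.Str.pyGet?_natCast, h5]; simp
  have e1 : PySem.Str.pyGet? template (1 : Int) = some c1 := by
    rw [show ((1 : Int)) = ((1 : Nat) : Int) by norm_num, PySem.Str.pyGet?_natCast, h5]; simp
  have e2 : PySem.Str.pyGet? template (2 : Int) = some c2 := by
    rw [show ((2 : Int)) = ((2 : Nat) : Int) by norm_num, PySem.Str.pyGet?_natCast, h5]; simp
  have e3 : PySem.Str.pyGet? template (3 : Int) = some c3 := by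
    rw [show ((3 : Int)) = ((3 : Nat) : Int) by norm_num, PySem.Str.pyGet?_natCast, h5]; simp
  have e4 : PySem.Str.pyGet? template (4 : Int) = some c4 := by
    rw [show ((4 : Int)) = ((4 : Nat) : Int) by norm_num, PySem.Str.pyGet?_natCast, h5]; simp
  have hr : PySem.List.pyRange 0 5 1 = [0, 1, 2, 3, 4] := by decide
  by_cases h0 : c0 = 'g' <;> by_cases h1 : c1 = 'g' <;> by_cases h2 : c2 = 'g' <;>
    by_cases h3 : c3 = 'g' <;> by_cases h4 : c4 = 'g' <;>
    simp only [get_all_possible_template_types, get_all_possible_template_types_alt, pvWalk, hr,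
      e0, e1, e2, e3, e4, h0, h1, h2, h3, h4, Option.getD_some, List.foldl,
      Nat.cast_ofNat, Nat.cast_zero, Nat.cast_one, Nat.reduceAdd, if_true, if_false] <;> decide
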